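-- pv_equiv track=rewrite | github.com/zingozingo/form_helper_v2 | backend/core/ai/form_context_analyzer.py | _assess_privacy_level
-- ===== SOURCE A (Python) =====
-- from typing import Dict, List, Any, Optional, Tuple
--
-- def _assess_privacy_level(fields: List[Dict[str, Any]]) -> str:
--     """
--     Assess the privacy sensitivity level of the form.
--
--     Args:
--         fields: List of field dictionaries
--
--     Returns:
--         Privacy level: "low", "standard", "high", or "very high"
--     """
--     # Count fields in different sensitivity categories
--     low_sensitivity = 0
--     medium_sensitivity = 0
--     high_sensitivity = 0
--     very_high_sensitivity = 0
--
--     for field in fields: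
--         field_name = field.get("name", "").lower()
--
--         # Very high sensitivity fields (financial, legal identifiers)
--         if any(term in field_name for term in ["ssn", "social security", "passport", "credit", "card", "cvv", "tax"]):
--             very_high_sensitivity += 1
--         # High sensitivity fields (personal identifiers)
--         elif any(term in field_name for term in ["password", "dob", "birth", "driver", "license", "income"]):
--             high_sensitivity += 1
--         # Medium sensitivity fields (contact information)
--         elif any(term in field_name for term in ["name", "email", "phone", "address", "city", "zip"]):
--             medium_sensitivity += 1
--         # Low sensitivity fields (preferences, general info)
--         else:
--             low_sensitivity += 1
--
--     # Determine overall privacy level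
--     if very_high_sensitivity > 0:
--         return "very high"
--     elif high_sensitivity > 0:
--         return "high"
--     elif medium_sensitivity > 0:
--         return "standard"
--     else:
--         return "low"
-- ===== SOURCE B (Python) =====
-- _TIER_TABLE = (
--     ("very high", ("ssn", "social security", "passport", "credit", "card", "cvv", "tax")),
--     ("high", ("password", "dob", "birth", "driver", "license", "income")),
--     ("standard", ("name", "email", "phone", "address", "city", "zip")),
-- )
--
--
-- def _assess_privacy_level(fields):
--     # Tier-major staged scans: lowercase the names once, then sweep the whole
--     # form once per tier from most to least sensitive, returning on first hit.
--     names = [f.get("name", "").lower() for f in fields]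
--     for label, terms in _TIER_TABLE:
--         if any(any(t in n for t in terms) for n in names):
--             return label
--     return "low"
-- ===== Notes on version B (the rewrite author's own statement) =====
-- stated objective: simpler
-- what changed: Replaces A's field-major single pass with four category counters and a threshold cascade by tier-major staged scans: lowercase the names once, then test the whole form against each tier's term list from most to least sensitive and return on the first tier that matches anywhere, defaulting to 'low'.
import Mathlib
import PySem

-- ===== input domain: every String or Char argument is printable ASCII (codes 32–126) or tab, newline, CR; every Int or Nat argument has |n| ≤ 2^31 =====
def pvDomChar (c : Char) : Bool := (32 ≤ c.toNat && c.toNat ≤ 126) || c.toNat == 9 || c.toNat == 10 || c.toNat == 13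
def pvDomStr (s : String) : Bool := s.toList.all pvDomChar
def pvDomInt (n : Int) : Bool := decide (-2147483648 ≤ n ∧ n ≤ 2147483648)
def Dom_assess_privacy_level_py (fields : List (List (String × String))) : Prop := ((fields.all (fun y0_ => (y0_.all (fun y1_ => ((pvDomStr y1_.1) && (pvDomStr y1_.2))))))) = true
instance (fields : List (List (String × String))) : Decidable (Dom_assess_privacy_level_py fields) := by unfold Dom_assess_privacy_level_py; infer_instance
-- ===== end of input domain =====

-- B replaces A's field-major pass with four counters + threshold cascade by tier-major
-- staged scans (lowercase the names once, test each tier from most sensitive, first hit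
-- wins): simpler decomposition, same cost.

-- Shared helpers: the term lists, a field's lowered name, "name contains some term".
def pvVhTerms : List String := ["ssn", "social security", "passport", "credit", "card", "cvv", "tax"]
def pvHTerms : List String := ["password", "dob", "birth", "driver", "license", "income"]
def pvMTerms : List String := ["name", "email", "phone", "address", "city", "zip"]
def pvNm (f : List (String × String)) : String := PySem.Str.lower ((PySem.Dict.mk f).getD "name" "")
def pvAnyTerm (terms : List String) (n : String) : Bool := terms.any (fun t => PySem.Str.isIn t n)

-- ===== PORT A =====
def pvStepA (st : Nat × Nat × Nat × Nat) (field : List (String × String)) : Nat × Nat × Nat × Nat :=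
  let fn := pvNm field
  if pvAnyTerm pvVhTerms fn then (st.1, st.2.1, st.2.2.1, st.2.2.2 + 1)
  else if pvAnyTerm pvHTerms fn then (st.1, st.2.1, st.2.2.1 + 1, st.2.2.2)
  else if pvAnyTerm pvMTerms fn then (st.1, st.2.1 + 1, st.2.2.1, st.2.2.2)
  else (st.1 + 1, st.2.1, st.2.2.1, st.2.2.2)

def assess_privacy_level_py (fields : List (List (String × String))) : String :=
  let c := fields.foldl pvStepA (0, 0, 0, 0)
  if c.2.2.2 > 0 then "very high"
  else if c.2.2.1 > 0 then "high"
  else if c.2.1 > 0 then "standard"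
  else "low"

-- ===== PORT B =====
def pvTierTable : List (String × List String) := [("very high", pvVhTerms), ("high", pvHTerms), ("standard", pvMTerms)]

def assess_privacy_level_py_alt (fields : List (List (String × String))) : String :=
  let names := fields.map pvNm
  match pvTierTable.find? (fun p => names.any (fun n => pvAnyTerm p.2 n)) with
  | some p => p.1
  | none => "low"

-- ===== PRECONDITION & SPEC =====
def Spec_assess_privacy_level_py (fields : List (List (String × String))) (out : String) : Prop := out = assess_privacy_level_py_alt fields
instance (fields : List (List (String × String))) (out : String) : Decidable (Spec_assess_privacy_level_py fields out) := by unfold Spec_assess_privacy_level_py; infer_instance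

-- ===== CLAIM (what is proved, stated in full; the proofs are below) =====
def Claim_equal_assess_privacy_level_py : Prop := ∀ (fields : List (List (String × String))), Dom_assess_privacy_level_py fields → Spec_assess_privacy_level_py fields (assess_privacy_level_py fields)

-- ===== LEMMAS AND PROOFS =====

-- A's three interesting counters count the fields falling into each elif branch.
theorem pvFold_counts (fs : List (List (String × String))) (st : Nat × Nat × Nat × Nat) :
    (fs.foldl pvStepA st).2.2.2 = st.2.2.2 + fs.countP (fun f => pvAnyTerm pvVhTerms (pvNm f)) ∧
    (fs.foldl pvStepA st).2.2.1 = st.2.2.1 + fs.countP (fun f => !pvAnyTerm pvVhTerms (pvNm f) && pvAnyTerm pvHTerms (pvNm f)) ∧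
    (fs.foldl pvStepA st).2.1 = st.2.1 + fs.countP (fun f => !pvAnyTerm pvVhTerms (pvNm f) && !pvAnyTerm pvHTerms (pvNm f) && pvAnyTerm pvMTerms (pvNm f)) := by
  induction fs generalizing st with
  | nil => simp
  | cons f t ih =>
    obtain ⟨i3, i2, i1⟩ := ih (pvStepA st f)
    simp only [List.foldl_cons, List.countP_cons] at *
    cases hv : pvAnyTerm pvVhTerms (pvNm f) <;>
      cases hh : pvAnyTerm pvHTerms (pvNm f) <;>
        cases hm : pvAnyTerm pvMTerms (pvNm f) <;>
          refine ⟨?_, ?_, ?_⟩ <;>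
            (simp only [i3, i2, i1]; simp [pvStepA, hv, hh, hm]) <;> omega

-- B unfolded to an if-chain over the three whole-form scans.
theorem pvAlt_eq (fields : List (List (String × String))) :
    assess_privacy_level_py_alt fields =
      if fields.any (fun f => pvAnyTerm pvVhTerms (pvNm f)) then "very high"
      else if fields.any (fun f => pvAnyTerm pvHTerms (pvNm f)) then "high"
      else if fields.any (fun f => pvAnyTerm pvMTerms (pvNm f)) then "standard"
      else "low" := by
  cases h3 : fields.any (fun f => pvAnyTerm pvVhTerms (pvNm f)) <;>
    cases h2 : fields.any (fun f => pvAnyTerm pvHTerms (pvNm f)) <;>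
      cases h1 : fields.any (fun f => pvAnyTerm pvMTerms (pvNm f)) <;>
        simp [assess_privacy_level_py_alt, pvTierTable, List.find?, List.any_map,
          Function.comp_def, h3, h2, h1]

-- ===== VERDICT (by name: the statement is the Claim_ definition above) =====
theorem assess_privacy_level_py_spec : Claim_equal_assess_privacy_level_py := by
  intro fields _
  show assess_privacy_level_py fields = assess_privacy_level_py_alt fields
  obtain ⟨h3, h2, h1⟩ := pvFold_counts fields (0, 0, 0, 0)
  rw [assess_privacy_level_py, pvAlt_eq]
  simp only [h3, h2, h1]
  cases b3 : fields.any (fun f => pvAnyTerm pvVhTerms (pvNm f)) with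
  | true =>
    have c3 : 0 < fields.countP (fun f => pvAnyTerm pvVhTerms (pvNm f)) := by
      rw [List.countP_pos_iff]; simpa [List.any_eq_true] using b3
    simp [c3]
  | false =>
    have hv : ∀ f ∈ fields, pvAnyTerm pvVhTerms (pvNm f) = false := by
      simpa [List.any_eq_false] using b3
    have c3 : fields.countP (fun f => pvAnyTerm pvVhTerms (pvNm f)) = 0 := by
      rw [List.countP_eq_zero]; intro f hf; simp [hv f hf]
    cases b2 : fields.any (fun f => pvAnyTerm pvHTerms (pvNm f)) with
    | true =>
      have c2 : 0 < fields.countP (fun f => !pvAnyTerm pvVhTerms (pvNm f) && pvAnyTerm pvHTerms (pvNm f)) := by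
        rw [List.countP_pos_iff]
        obtain ⟨f, hf, hm⟩ := List.any_eq_true.mp b2
        exact ⟨f, hf, by simp [hv f hf, hm]⟩
      simp [c3, c2]
    | false =>
      have hh : ∀ f ∈ fields, pvAnyTerm pvHTerms (pvNm f) = false := by
        simpa [List.any_eq_false] using b2
      have c2 : fields.countP (fun f => !pvAnyTerm pvVhTerms (pvNm f) && pvAnyTerm pvHTerms (pvNm f)) = 0 := by
        rw [List.countP_eq_zero]; intro f hf; simp [hh f hf]
      cases b1 : fields.any (fun f => pvAnyTerm pvMTerms (pvNm f)) with
      | true =>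
        have c1 : 0 < fields.countP (fun f => !pvAnyTerm pvVhTerms (pvNm f) && !pvAnyTerm pvHTerms (pvNm f) && pvAnyTerm pvMTerms (pvNm f)) := by
          rw [List.countP_pos_iff]
          obtain ⟨f, hf, hm⟩ := List.any_eq_true.mp b1
          exact ⟨f, hf, by simp [hv f hf, hh f hf, hm]⟩
        simp [c3, c2, c1]
      | false =>
        have c1 : fields.countP (fun f => !pvAnyTerm pvVhTerms (pvNm f) && !pvAnyTerm pvHTerms (pvNm f) && pvAnyTerm pvMTerms (pvNm f)) = 0 := by
          rw [List.countP_eq_zero]; intro f hf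
          have := List.any_eq_false.mp b1 f hf
          simp [this]
        simp [c3, c2, c1]
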